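-- pv_equiv track=rewrite | github.com/Taha-Nasreddine-KERROUM/Analyse-Numerique-I-TP | FINALE/helpers.py | copyMat
-- ===== SOURCE A (Python) =====
-- def copyMat(mat, k, b):
--     n = len(mat)
--     new = [[0 for _ in range(n)] for _ in range(n)]
--     for i in range(n):
--         for j in range(n):
--             if j == k:
--                 new[i][j] = b[i]
--                 continue
--             new[i][j] = mat[i][j]
--
--     return new
-- ===== SOURCE B (Python) =====
-- def copyMat(mat, k, b):
--     # column-major: build each column (column k is b), then transpose with zip
--     n = len(mat)
--     cols = [list(b[:n]) if j == k else [mat[i][j] for i in range(n)] for j in range(n)]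
--     return [list(row) for row in zip(*cols)]
-- ===== Notes on version B (the rewrite author's own statement) =====
-- stated objective: alternative
-- what changed: Builds the result column-major -- constructs each output column as a list (column k is b[:n], the others read off mat) -- and transposes with zip(*cols), instead of A's row-major nested i,j loop writing cells into a preallocated zero matrix.
import Mathlib
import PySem

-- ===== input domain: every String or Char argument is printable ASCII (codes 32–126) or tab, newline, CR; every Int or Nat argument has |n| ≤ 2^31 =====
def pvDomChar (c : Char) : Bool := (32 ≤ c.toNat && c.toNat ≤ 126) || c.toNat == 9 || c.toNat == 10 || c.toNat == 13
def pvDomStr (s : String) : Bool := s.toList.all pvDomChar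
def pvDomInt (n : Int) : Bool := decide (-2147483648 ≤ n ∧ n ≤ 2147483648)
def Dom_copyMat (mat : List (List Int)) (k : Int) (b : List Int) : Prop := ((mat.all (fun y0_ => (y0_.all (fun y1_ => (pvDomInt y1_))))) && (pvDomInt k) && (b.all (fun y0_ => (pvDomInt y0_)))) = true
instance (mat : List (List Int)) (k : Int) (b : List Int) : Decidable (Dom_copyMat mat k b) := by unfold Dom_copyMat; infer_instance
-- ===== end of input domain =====

-- B builds the result column-major — each column of the output as a list (column k is b, the
-- others are read off mat) — and transposes with zip, instead of A's row-major nested i,j loop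
-- over a preallocated zero matrix (objective: alternative).

-- ===== PORT A =====
-- helper: the Python statement `m[i][j] = v` on a list-of-lists
def setCell (m : List (List Int)) (i j : Nat) (v : Int) : List (List Int) :=
  m.modify i (fun r => r.set j v)

def copyMat (mat : List (List Int)) (k : Int) (b : List Int) : List (List Int) :=
  let n := mat.length
  let new := (PySem.List.pyRange 0 (n : Int) 1).map (fun _ =>
    (PySem.List.pyRange 0 (n : Int) 1).map (fun _ => (0 : Int)))
  (PySem.List.pyRange 0 (n : Int) 1).foldl (fun new i =>
    (PySem.List.pyRange 0 (n : Int) 1).foldl (fun new j =>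
      if j = k then
        setCell new i.toNat j.toNat (PySem.List.pyGetD b i 0)
      else
        setCell new i.toNat j.toNat
          (PySem.List.pyGetD (PySem.List.pyGetD mat i []) j 0)) new) new

-- ===== PORT B =====
-- termination lemmas for zipStar (cited by its decreasing_by)
theorem sum_len_tail_le (cols : List (List Int)) :
    ((cols.map List.tail).map List.length).sum ≤ (cols.map List.length).sum := by
  induction cols with
  | nil => simp
  | cons c t ih => simp only [List.map_cons, List.sum_cons, List.length_tail]; omega

theorem sum_len_tail_lt (cols : List (List Int)) (h1 : cols ≠ [])
    (h2 : ∀ c ∈ cols, c ≠ []) :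
    ((cols.map List.tail).map List.length).sum < (cols.map List.length).sum := by
  cases cols with
  | nil => exact absurd rfl h1
  | cons c t =>
      have hc : c ≠ [] := h2 c (List.mem_cons_self)
      have hclen : 0 < c.length := List.length_pos_iff.mpr hc
      have := sum_len_tail_le t
      simp only [List.map_cons, List.sum_cons, List.length_tail]
      omega

-- port of Python's n-ary `zip(*cols)`: take heads while every column is nonempty
def zipStar (cols : List (List Int)) : List (List Int) :=
  if cols.isEmpty then []
  else if cols.all (fun c => !c.isEmpty) then
    (cols.map (fun c => c.headD 0)) :: zipStar (cols.map List.tail)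
  else []
termination_by (cols.map List.length).sum
decreasing_by
  rename_i h1 h2
  have h1' : cols ≠ [] := by simpa [List.isEmpty_iff] using h1
  have h2' : ∀ c ∈ cols, c ≠ [] := by
    intro c hc
    simpa [List.isEmpty_iff] using List.all_eq_true.mp h2 c hc
  simpa using sum_len_tail_lt cols h1' h2'

def copyMat_alt (mat : List (List Int)) (k : Int) (b : List Int) : List (List Int) :=
  let n := mat.length
  let cols := (PySem.List.pyRange 0 (n : Int) 1).map (fun j =>
    if j = k then PySem.List.slice b none (some (n : Int))
    else (PySem.List.pyRange 0 (n : Int) 1).map (fun i =>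
      PySem.List.pyGetD (PySem.List.pyGetD mat i []) j 0))
  zipStar cols

-- ===== PRECONDITION & SPEC =====
-- Pre_ excludes exactly the inputs where the Python A raises IndexError: a row too short for
-- the off-column indices A reads, or b shorter than n while column k is in range.
def Pre_copyMat (mat : List (List Int)) (k : Int) (b : List Int) : Prop :=
  (∀ row ∈ mat, ∀ j < mat.length, (j : Int) ≠ k → j < row.length) ∧
  (0 ≤ k → k < (mat.length : Int) → mat.length ≤ b.length)
instance (mat : List (List Int)) (k : Int) (b : List Int) : Decidable (Pre_copyMat mat k b) := by
  unfold Pre_copyMat; infer_instance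

def pvWitness_copyMat : List (List Int) × Int × List Int := ([[1, 2], [3, 4]], 1, [9, 8])

def Spec_copyMat (mat : List (List Int)) (k : Int) (b : List Int) (out : List (List Int)) : Prop := out = copyMat_alt mat k b
instance (mat : List (List Int)) (k : Int) (b : List Int) (out : List (List Int)) : Decidable (Spec_copyMat mat k b out) := by unfold Spec_copyMat; infer_instance

-- ===== CLAIM =====
def Claim_equal_copyMat : Prop := ∀ (mat : List (List Int)) (k : Int) (b : List Int), Dom_copyMat mat k b → Pre_copyMat mat k b → Spec_copyMat mat k b (copyMat mat k b)

-- ===== LEMMAS AND PROOFS =====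

-- the value both programs put into cell (i, j)
def cellVal (mat : List (List Int)) (k : Int) (b : List Int) (i j : Nat) : Int :=
  if (j : Int) = k then b.getD i 0 else (mat.getD i []).getD j 0

-- the common canonical result
def canon (mat : List (List Int)) (k : Int) (b : List Int) : List (List Int) :=
  (List.range mat.length).map (fun i =>
    (List.range mat.length).map (fun j => cellVal mat k b i j))

theorem foldl_pyRange_eq_foldl_range {α : Type} (n : Nat) (f : α → Int → α) (init : α) :
    (PySem.List.pyRange 0 (n : Int) 1).foldl f init
      = (List.range n).foldl (fun a (j : Nat) => f a (j : Int)) init := by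
  rw [PySem.List.pyRange_zero_natCast]
  exact List.foldl_map

theorem getD_modify (l : List (List Int)) (i j : Nat) (f : List Int → List Int) :
    (l.modify i f).getD j [] =
      if i = j ∧ j < l.length then f (l.getD j []) else l.getD j [] := by
  simp only [List.getD_eq_getElem?_getD, List.getElem?_modify]
  by_cases h : j < l.length
  · rw [List.getElem?_eq_getElem h]
    by_cases hij : i = j <;> simp [hij, h]
  · rw [List.getElem?_eq_none (by omega)]
    simp [h]

theorem getD_set (l : List Int) (i j : Nat) (a : Int) :
    (l.set i a).getD j 0 =
      if i = j ∧ i < l.length then a else l.getD j 0 := by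
  simp only [List.getD_eq_getElem?_getD, List.getElem?_set]
  by_cases hij : i = j
  · subst hij
    by_cases h : i < l.length
    · simp [h]
    · simp [h]
  · simp [hij]

theorem foldl_modify_same {β : Type} (l : List β) (i : Nat) (h : β → List Int → List Int)
    (m : List (List Int)) :
    l.foldl (fun acc j => acc.modify i (h j)) m
      = m.modify i (fun r => l.foldl (fun r j => h j r) r) := by
  induction l generalizing m with
  | nil =>
      apply List.ext_getElem?
      intro j
      simp [List.getElem?_modify]
  | cons a t ih =>
      simp only [List.foldl_cons]
      rw [ih]
      apply List.ext_getElem?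
      intro j
      simp only [List.getElem?_modify]
      cases m[j]? with
      | none => rfl
      | some r => by_cases hij : i = j <;> simp [hij]

theorem length_foldl_modify (l : List Nat) (g : Nat → List Int → List Int)
    (m : List (List Int)) :
    (l.foldl (fun acc i => acc.modify i (g i)) m).length = m.length := by
  induction l generalizing m with
  | nil => rfl
  | cons a t ih => simp [List.foldl_cons, ih]

theorem getD_foldl_modify (n : Nat) (g : Nat → List Int → List Int)
    (m : List (List Int)) (j : Nat) :
    ((List.range n).foldl (fun acc i => acc.modify i (g i)) m).getD j []
      = if j < n ∧ j < m.length then g j (m.getD j []) else m.getD j [] := by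
  induction n with
  | zero => simp
  | succ n ih =>
      rw [List.range_succ, List.foldl_append, List.foldl_cons, List.foldl_nil,
        getD_modify, length_foldl_modify, ih]
      by_cases hj : j < m.length
      · by_cases hnj : n = j
        · subst hnj
          rw [if_pos ⟨rfl, hj⟩, if_neg (by omega : ¬(n < n ∧ n < m.length)), if_pos (⟨by omega, hj⟩ : n < n + 1 ∧ n < m.length)]
        · rw [if_neg (by omega)]
          by_cases hlt : j < n
          · rw [if_pos ⟨hlt, hj⟩, if_pos ⟨by omega, hj⟩]
          · rw [if_neg (by omega), if_neg (by omega)]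
      · rw [if_neg (by omega), if_neg (by omega), if_neg (by omega)]

theorem length_foldl_set (l : List Nat) (v : Nat → Int) (r : List Int) :
    (l.foldl (fun r j => r.set j (v j)) r).length = r.length := by
  induction l generalizing r with
  | nil => rfl
  | cons a t ih => simp [List.foldl_cons, ih]

theorem getD_foldl_set (n : Nat) (v : Nat → Int) (r : List Int) (t : Nat) :
    ((List.range n).foldl (fun r j => r.set j (v j)) r).getD t 0
      = if t < n ∧ t < r.length then v t else r.getD t 0 := by
  induction n with
  | zero => simp
  | succ n ih =>
      rw [List.range_succ, List.foldl_append, List.foldl_cons, List.foldl_nil,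
        getD_set, length_foldl_set, ih]
      by_cases ht : t < r.length
      · by_cases hnt : n = t
        · subst hnt
          rw [if_pos ⟨rfl, ht⟩, if_pos (⟨by omega, ht⟩ : n < n + 1 ∧ n < r.length)]
        · rw [if_neg (by omega)]
          by_cases hlt : t < n
          · rw [if_pos ⟨hlt, ht⟩, if_pos ⟨by omega, ht⟩]
          · rw [if_neg (by omega), if_neg (by omega)]
      · rw [if_neg (by omega), if_neg (by omega), if_neg (by omega)]

-- port A as a fold of whole-row rewrites
theorem copyMat_eq_fold (mat : List (List Int)) (k : Int) (b : List Int) :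
    copyMat mat k b =
      (List.range mat.length).foldl
        (fun acc i => acc.modify i
          (fun r => (List.range mat.length).foldl
            (fun r j => r.set j (cellVal mat k b i j)) r))
        ((List.range mat.length).map (fun _ =>
          (List.range mat.length).map (fun _ => (0 : Int)))) := by
  unfold copyMat
  simp only []
  rw [foldl_pyRange_eq_foldl_range]
  have hinit : ((PySem.List.pyRange 0 (mat.length : Int) 1).map (fun _ =>
      (PySem.List.pyRange 0 (mat.length : Int) 1).map (fun _ => (0 : Int))))
      = ((List.range mat.length).map (fun _ =>
      (List.range mat.length).map (fun _ => (0 : Int)))) := by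
    rw [PySem.List.pyRange_zero_natCast, List.map_map, List.map_map]
    rfl
  rw [hinit]
  have hfun : (fun (new : List (List Int)) (i : Nat) =>
      (PySem.List.pyRange 0 (mat.length : Int) 1).foldl (fun new j =>
        if j = k then
          setCell new ((i : Int)).toNat j.toNat (PySem.List.pyGetD b (i : Int) 0)
        else
          setCell new ((i : Int)).toNat j.toNat
            (PySem.List.pyGetD (PySem.List.pyGetD mat (i : Int) []) j 0)) new)
      = (fun (acc : List (List Int)) (i : Nat) => acc.modify i
          (fun r => (List.range mat.length).foldl
            (fun r j => r.set j (cellVal mat k b i j)) r)) := by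
    funext new i
    rw [foldl_pyRange_eq_foldl_range]
    have hstep : (fun (new : List (List Int)) (j : Nat) =>
        if (j : Int) = k then
          setCell new ((i : Int)).toNat ((j : Int)).toNat (PySem.List.pyGetD b (i : Int) 0)
        else
          setCell new ((i : Int)).toNat ((j : Int)).toNat
            (PySem.List.pyGetD (PySem.List.pyGetD mat (i : Int) []) (j : Int) 0))
        = (fun (new : List (List Int)) (j : Nat) =>
            new.modify i (fun r => r.set j (cellVal mat k b i j))) := by
      funext new j
      by_cases hc : (j : Int) = k
      · rw [if_pos hc]
        simp only [setCell, cellVal, if_pos hc, Int.toNat_natCast,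
          PySem.List.pyGetD_natCast]
      · rw [if_neg hc]
        simp only [setCell, cellVal, if_neg hc, Int.toNat_natCast,
          PySem.List.pyGetD_natCast]
    rw [hstep, foldl_modify_same]
  rw [hfun]

-- A equals the canonical matrix (unconditionally)
theorem copyMat_eq_canon (mat : List (List Int)) (k : Int) (b : List Int) :
    copyMat mat k b = canon mat k b := by
  rw [copyMat_eq_fold]
  unfold canon
  apply List.ext_getElem?
  intro i
  by_cases hi : i < mat.length
  · have hlenA : ((List.range mat.length).foldl
        (fun acc i => acc.modify i
          (fun r => (List.range mat.length).foldl
            (fun r j => r.set j (cellVal mat k b i j)) r))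
        ((List.range mat.length).map (fun _ =>
          (List.range mat.length).map (fun _ => (0 : Int))))).length = mat.length := by
      rw [length_foldl_modify]; simp
    rw [List.getElem?_eq_getElem (by rw [hlenA]; exact hi),
      List.getElem?_eq_getElem (by simpa using hi)]
    have hgd : ∀ (l : List (List Int)) (h : i < l.length), l[i] = l.getD i [] := by
      intro l h
      rw [List.getD_eq_getElem?_getD, List.getElem?_eq_getElem h]; rfl
    rw [hgd _ _, hgd _ _, getD_foldl_modify,
      if_pos ⟨hi, by simpa using hi⟩]
    have hzero : (((List.range mat.length).map (fun _ =>
        (List.range mat.length).map (fun _ => (0 : Int)))).getD i [])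
        = (List.range mat.length).map (fun _ => (0 : Int)) := by
      rw [List.getD_eq_getElem?_getD, List.getElem?_map, List.getElem?_range hi]; rfl
    rw [hzero]
    have hcanon : ((List.range mat.length).map (fun i =>
        (List.range mat.length).map (fun j => cellVal mat k b i j))).getD i []
        = (List.range mat.length).map (fun j => cellVal mat k b i j) := by
      rw [List.getD_eq_getElem?_getD, List.getElem?_map, List.getElem?_range hi]; rfl
    rw [hcanon]
    congr 1
    apply List.ext_getElem
    · rw [length_foldl_set]; simp
    · intro t h1 h2
      have ht : t < mat.length := by simpa using h2
      have hgd2 : ∀ (l : List Int) (h : t < l.length), l[t] = l.getD t 0 := by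
        intro l h
        rw [List.getD_eq_getElem?_getD, List.getElem?_eq_getElem h]; rfl
      rw [hgd2 _ h1, hgd2 _ h2, getD_foldl_set, if_pos ⟨ht, by simpa using ht⟩]
      rw [List.getD_eq_getElem?_getD, List.getElem?_map, List.getElem?_range ht]; rfl
  · rw [List.getElem?_eq_none (by rw [length_foldl_modify]; simpa using hi),
      List.getElem?_eq_none (by simpa using hi)]

-- zipStar of a nonempty list of equal-length columns is the row-wise read-off
theorem zipStar_rect (n : Nat) : ∀ (cols : List (List Int)), cols ≠ [] →
    (∀ c ∈ cols, c.length = n) →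
    zipStar cols = (List.range n).map (fun i => cols.map (fun c => c.getD i 0)) := by
  induction n with
  | zero =>
      intro cols hne hlen
      unfold zipStar
      have hempty : cols.isEmpty = false := by
        simpa [List.isEmpty_iff] using hne
      rw [hempty]
      have hall : cols.all (fun c => !c.isEmpty) = false := by
        cases cols with
        | nil => exact absurd rfl hne
        | cons c t =>
            have : c = [] := List.length_eq_zero_iff.mp (hlen c List.mem_cons_self)
            subst this
            simp
      rw [hall]
      simp
  | succ n ih =>
      intro cols hne hlen
      have hall : ∀ c ∈ cols, c ≠ [] := by
        intro c hc h
        have := hlen c hc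
        subst h; simp at this
      unfold zipStar
      have hempty : cols.isEmpty = false := by simpa [List.isEmpty_iff] using hne
      rw [hempty]
      have hallb : cols.all (fun c => !c.isEmpty) = true := by
        rw [List.all_eq_true]
        intro c hc
        simpa [List.isEmpty_iff] using hall c hc
      rw [hallb]
      simp only [if_true, if_false, Bool.false_eq_true]
      have htne : cols.map List.tail ≠ [] := by
        simpa using hne
      have htlen : ∀ c ∈ cols.map List.tail, c.length = n := by
        intro c hc
        obtain ⟨d, hd, rfl⟩ := List.mem_map.mp hc
        have := hlen d hd
        simp [List.length_tail, this]
      rw [ih (cols.map List.tail) htne htlen]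
      rw [List.range_succ_eq_map, List.map_cons, List.map_map]
      congr 1
      · apply List.map_congr_left
        intro c hc
        have hcne := hall c hc
        cases c with
        | nil => exact absurd rfl hcne
        | cons a t => rfl
      · apply List.map_congr_left
        intro i _
        simp only [Function.comp]
        rw [List.map_map]
        apply List.map_congr_left
        intro c hc
        have hcne := hall c hc
        cases c with
        | nil => exact absurd rfl hcne
        | cons a t => rfl

-- B's columns, with Nat indices
def colFun (mat : List (List Int)) (k : Int) (b : List Int) (j : Nat) : List Int :=
  if (j : Int) = k then b.take mat.length
  else (List.range mat.length).map (fun i => (mat.getD i []).getD j 0)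

theorem copyMat_alt_eq (mat : List (List Int)) (k : Int) (b : List Int) :
    copyMat_alt mat k b = zipStar ((List.range mat.length).map (colFun mat k b)) := by
  unfold copyMat_alt
  simp only []
  congr 1
  rw [PySem.List.pyRange_zero_natCast, List.map_map]
  apply List.map_congr_left
  intro j hj
  simp only [Function.comp]
  unfold colFun
  by_cases hjk : ((j : Nat) : Int) = k
  · rw [if_pos hjk, if_pos hjk, PySem.List.slice_to_natCast]
  · rw [if_neg hjk, if_neg hjk, List.map_map]
    apply List.map_congr_left
    intro i _
    simp only [Function.comp]
    rw [PySem.List.pyGetD_natCast, PySem.List.pyGetD_natCast]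

-- B equals the canonical matrix under Pre_
theorem copyMat_alt_eq_canon (mat : List (List Int)) (k : Int) (b : List Int)
    (hb : 0 ≤ k → k < (mat.length : Int) → mat.length ≤ b.length) :
    copyMat_alt mat k b = canon mat k b := by
  rw [copyMat_alt_eq]
  unfold canon
  cases Nat.eq_zero_or_pos mat.length with
  | inl h0 =>
      rw [h0]
      have : zipStar [] = [] := by unfold zipStar; rfl
      simp [this]
  | inr hpos =>
      have hcne : (List.range mat.length).map (colFun mat k b) ≠ [] := by
        simp only [ne_eq, List.map_eq_nil_iff, List.range_eq_nil]
        omega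
      have hclen : ∀ c ∈ (List.range mat.length).map (colFun mat k b),
          c.length = mat.length := by
        intro c hc
        obtain ⟨j, hj, rfl⟩ := List.mem_map.mp hc
        rw [List.mem_range] at hj
        unfold colFun
        by_cases hjk : ((j : Nat) : Int) = k
        · rw [if_pos hjk]
          have hk0 : 0 ≤ k := by omega
          have hkn : k < (mat.length : Int) := by omega
          have := hb hk0 hkn
          simp
          omega
        · rw [if_neg hjk]
          simp
      rw [zipStar_rect mat.length _ hcne hclen]
      apply List.map_congr_left
      intro i hi
      rw [List.mem_range] at hi
      rw [List.map_map]
      apply List.map_congr_left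
      intro j hj
      rw [List.mem_range] at hj
      simp only [Function.comp]
      unfold colFun cellVal
      by_cases hjk : ((j : Nat) : Int) = k
      · rw [if_pos hjk, if_pos hjk]
        have hk0 : 0 ≤ k := by omega
        have hkn : k < (mat.length : Int) := by omega
        have hbn : mat.length ≤ b.length := hb hk0 hkn
        rw [List.getD_eq_getElem?_getD, List.getD_eq_getElem?_getD,
          List.getElem?_take_of_lt hi]
      · rw [if_neg hjk, if_neg hjk]
        rw [List.getD_eq_getElem?_getD, List.getElem?_map, List.getElem?_range hi]
        rfl

-- ===== VERDICT =====
theorem copyMat_spec : Claim_equal_copyMat := by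
  intro mat k b _hdom hpre
  unfold Spec_copyMat
  rw [copyMat_eq_canon, copyMat_alt_eq_canon mat k b hpre.2]
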